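-- pv_equiv track=rewrite | github.com/hamzaehsan97/CSS-optomizer | main.py | returnAtText
-- ===== SOURCE A (Python) =====
-- def returnAtText(seperatedByAt):
--     counter = 0
--     returnText = ''
--     queryOpened = False
--     for i in range(0,len(seperatedByAt)):
--         if seperatedByAt[i] == '{':
--             queryOpened = True
--             counter+=1
--         elif seperatedByAt[i] == '}':
--             counter-=1
--         returnText = returnText + seperatedByAt[i]
--         if counter == 0 and queryOpened == True:
--             break
--     return returnText
-- ===== SOURCE B (Python) =====
-- def returnAtText(seperatedByAt):
--     j = seperatedByAt.find('{')
--     if j == -1: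
--         return seperatedByAt
--     depths = []
--     d = 0
--     for c in seperatedByAt:
--         d += (c == '{') - (c == '}')
--         depths.append(d)
--     for i in range(j, len(seperatedByAt)):
--         if depths[i] == 0:
--             return seperatedByAt[:i + 1]
--     return seperatedByAt
-- ===== Notes on version B (the rewrite author's own statement) =====
-- stated objective: faster
-- what changed: Replaces the incremental counter-and-concatenate loop with a two-phase approach: build a cumulative-depth table once, then scan it from the first opening brace for the first zero and slice the prefix, avoiding A's repeated string concatenation.
import Mathlib
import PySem

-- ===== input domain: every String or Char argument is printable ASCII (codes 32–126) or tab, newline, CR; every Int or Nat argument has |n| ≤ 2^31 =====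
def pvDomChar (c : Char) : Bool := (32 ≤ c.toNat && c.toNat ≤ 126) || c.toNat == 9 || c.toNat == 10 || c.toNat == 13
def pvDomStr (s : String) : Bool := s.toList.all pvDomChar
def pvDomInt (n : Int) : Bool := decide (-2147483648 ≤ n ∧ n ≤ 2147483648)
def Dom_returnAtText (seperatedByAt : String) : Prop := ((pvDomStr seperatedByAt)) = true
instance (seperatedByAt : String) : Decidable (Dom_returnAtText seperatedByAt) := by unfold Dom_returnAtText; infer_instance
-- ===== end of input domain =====

-- B replaces A's incremental counter-and-concatenate loop with a precomputed
-- cumulative-depth table scanned from the first '{' (alternative decomposition, same result).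

-- ===== PORT A =====
-- the for-loop of A: state (counter, accumulated text, queryOpened); 'break' = stop recursing
def pvLoopA : List Char → Int → List Char → Bool → List Char
  | [], _, acc, _ => acc
  | c :: rest, counter, acc, opened =>
    let opened' := if c = '{' then true else opened
    let counter' := if c = '{' then counter + 1 else if c = '}' then counter - 1 else counter
    let acc' := acc ++ [c]
    if counter' = 0 ∧ opened' = true then acc' else pvLoopA rest counter' acc' opened'

def returnAtText (seperatedByAt : String) : String :=
  String.ofList (pvLoopA seperatedByAt.toList 0 [] false)

-- ===== PORT B =====
-- second loop of Source B: scan depths[j:] for the first zero, returning its absolute index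
def pvScanB : List Int → Nat → Option Nat
  | [], _ => none
  | d :: r, i => if d = 0 then some i else pvScanB r (i + 1)

def returnAtText_alt (seperatedByAt : String) : String :=
  -- seperatedByAt.find('{'): index of first '{', none = -1
  match seperatedByAt.toList.findIdx? (· = '{') with
  | none => seperatedByAt
  | some j =>
    match pvScanB (((seperatedByAt.toList.foldl
        -- first loop of Source B: cumulative depth table, built by one fold
        (fun (st : Int × List Int) c =>
          let d := st.1 + ((if c = '{' then 1 else 0) - (if c = '}' then 1 else 0))
          (d, st.2 ++ [d]))
        ((0 : Int), ([] : List Int))).2).drop j) j with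
    | none => seperatedByAt
    | some i => String.ofList (seperatedByAt.toList.take (i + 1))   -- seperatedByAt[:i+1], i+1 ≥ 0 so slice = take

-- ===== PRECONDITION & SPEC =====
def Spec_returnAtText (seperatedByAt : String) (out : String) : Prop := out = returnAtText_alt seperatedByAt
instance (seperatedByAt : String) (out : String) : Decidable (Spec_returnAtText seperatedByAt out) := by unfold Spec_returnAtText; infer_instance

-- ===== CLAIM (what is proved, stated in full; the proofs are below) =====
def Claim_equal_returnAtText : Prop := ∀ (seperatedByAt : String), Dom_returnAtText seperatedByAt → Spec_returnAtText seperatedByAt (returnAtText seperatedByAt)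

-- ===== LEMMAS AND PROOFS =====

-- proof-only helpers: A's loop without the accumulator, and B's depth table
def pvCore : List Char → Int → Bool → List Char
  | [], _, _ => []
  | c :: r, d, op =>
    let op' := if c = '{' then true else op
    let d' := if c = '{' then d + 1 else if c = '}' then d - 1 else d
    c :: (if d' = 0 ∧ op' = true then [] else pvCore r d' op')

def pvDep : List Char → Int → List Int
  | [], _ => []
  | c :: r, d =>
    let d' := d + ((if c = '{' then 1 else 0) - (if c = '}' then 1 else 0))
    d' :: pvDep r d'

theorem pvLoopA_core : ∀ (cs : List Char) (d : Int) (acc : List Char) (op : Bool),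
    pvLoopA cs d acc op = acc ++ pvCore cs d op := by
  intro cs
  induction cs with
  | nil => intro d acc op; simp [pvLoopA, pvCore]
  | cons c r ih =>
    intro d acc op
    simp only [pvLoopA, pvCore]
    split_ifs with h <;> simp [ih]

theorem pvFold_dep : ∀ (cs : List Char) (d : Int) (acc : List Int),
    (cs.foldl (fun (st : Int × List Int) c =>
        let d := st.1 + ((if c = '{' then 1 else 0) - (if c = '}' then 1 else 0))
        (d, st.2 ++ [d])) (d, acc)).2 = acc ++ pvDep cs d := by
  intro cs
  induction cs with
  | nil => intro d acc; simp [pvDep]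
  | cons c r ih => intro d acc; simp only [List.foldl, pvDep]; rw [ih]; simp

theorem pvScanB_shift : ∀ (l : List Int) (k : Nat),
    pvScanB l k = (pvScanB l 0).map (· + k) := by
  intro l
  induction l with
  | nil => intro k; simp [pvScanB]
  | cons d r ih =>
    intro k
    simp only [pvScanB]
    split
    · simp
    · rw [ih (k + 1), ih 1, Option.map_map]
      congr 1
      funext i
      simp
      omega

theorem pvCore_open : ∀ (cs : List Char) (d : Int),
    pvCore cs d true =
      match pvScanB (pvDep cs d) 0 with
      | none => cs
      | some i => cs.take (i + 1) := by
  intro cs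
  induction cs with
  | nil => intro d; simp [pvCore, pvDep, pvScanB]
  | cons c r ih =>
    intro d
    have hd : (if c = '{' then d + 1 else if c = '}' then d - 1 else d)
        = d + ((if c = '{' then 1 else 0) - (if c = '}' then 1 else 0)) := by
      by_cases h1 : c = '{' <;> by_cases h2 : c = '}' <;> (simp [h1, h2]; try omega)
    simp only [pvCore, pvDep, pvScanB, ite_self, hd]
    set d' := d + ((if c = '{' then 1 else 0) - (if c = '}' then 1 else 0)) with hd'
    by_cases hz : d' = 0
    · simp [hz]
    · simp only [hz, and_true, if_false, Nat.zero_add]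
      rw [pvScanB_shift (pvDep r d') 1, ih d']
      cases pvScanB (pvDep r d') 0 with
      | none => simp
      | some i => simp [List.take_succ_cons]

theorem pvCore_main : ∀ (cs : List Char) (d : Int),
    pvCore cs d false =
      match cs.findIdx? (· = '{') with
      | none => cs
      | some j =>
        match pvScanB ((pvDep cs d).drop j) j with
        | none => cs
        | some i => cs.take (i + 1) := by
  intro cs
  induction cs with
  | nil => intro d; simp [pvCore]
  | cons c r ih =>
    intro d
    by_cases hc : c = '{'
    · subst hc
      have h2 : ('{' : Char) ≠ '}' := by decide
      simp only [List.findIdx?_cons, decide_true, if_true, List.drop_zero,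
        pvCore, pvDep, pvScanB, h2, if_false, and_true]
      norm_num
      by_cases hz : d + 1 = 0
      · simp [hz]
      · simp only [hz, if_false]
        rw [pvScanB_shift (pvDep r (d + 1)) 1, pvCore_open r (d + 1)]
        cases pvScanB (pvDep r (d + 1)) 0 with
        | none => simp
        | some i => simp
    · have hd : (if c = '{' then d + 1 else if c = '}' then d - 1 else d)
          = d + ((if c = '{' then 1 else 0) - (if c = '}' then 1 else 0)) := by
        by_cases h2 : c = '}' <;> (simp [hc, h2]; try omega)
      simp only [pvCore, pvDep]
      rw [hd]
      set d' := d + ((if c = '{' then 1 else 0) - (if c = '}' then 1 else 0)) with hd'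
      simp only [hc, List.findIdx?_cons, decide_false, if_false, Bool.false_eq_true, and_false]
      rw [ih d']
      cases hfi : r.findIdx? (· = '{') with
      | none => rfl
      | some j =>
        simp only [Option.map_some, List.drop_succ_cons]
        rw [pvScanB_shift ((pvDep r d').drop j) (j + 1), pvScanB_shift ((pvDep r d').drop j) j]
        cases pvScanB ((pvDep r d').drop j) 0 with
        | none => rfl
        | some i =>
          simp only [Option.map_some]
          rw [List.take_succ_cons]
          congr 2

-- ===== VERDICT (by name: the statement is the Claim_ definition above) =====
theorem returnAtText_spec : Claim_equal_returnAtText := by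
  intro s _
  unfold Spec_returnAtText returnAtText returnAtText_alt
  rw [pvLoopA_core, pvFold_dep, pvCore_main s.toList 0]
  simp only [List.nil_append]
  cases hfi : s.toList.findIdx? (· = '{') with
  | none => simp [String.ofList_toList]
  | some j =>
    cases hsc : pvScanB ((pvDep s.toList 0).drop j) j with
    | none => simp [hsc, String.ofList_toList]
    | some i => simp [hsc]
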